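-- pv_equiv track=rewrite | github.com/ellie-as/sequence-memory | scripts/tree_utils.py | infer_grandparent_edges
-- ===== SOURCE A (Python) =====
-- def infer_grandparent_edges(relationships):
--     # Temporarily store grandparent relationships to avoid modifying the dictionary while iterating
--     temp_relationships = {}
--
--     for person, rels in relationships.items():
--         if 'PARENT_OF' in rels:
--             for child in rels['PARENT_OF']:
--                 if 'PARENT_OF' in relationships[child]:
--                     for grandchild in relationships[child]['PARENT_OF']:
--                         # Ensure initialization of 'GRANDPARENT_OF' list for person
--                         if person not in temp_relationships:
--                             temp_relationships[person] = {}
--                         if 'GRANDPARENT_OF' not in temp_relationships[person]: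
--                             temp_relationships[person]['GRANDPARENT_OF'] = []
--                         temp_relationships[person]['GRANDPARENT_OF'].append(grandchild)
--
--                         # Ensure initialization of 'GRANDCHILD_OF' list for grandchild
--                         if grandchild not in temp_relationships:
--                             temp_relationships[grandchild] = {}
--                         if 'GRANDCHILD_OF' not in temp_relationships[grandchild]:
--                             temp_relationships[grandchild]['GRANDCHILD_OF'] = []
--                         temp_relationships[grandchild]['GRANDCHILD_OF'].append(person)
--
--     # Update the original relationships with the inferred grandparent relationships
--     for person, rels in temp_relationships.items():
--         if person in relationships:
--             for key, value in rels.items():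
--                 if key in relationships[person]:
--                     relationships[person][key].extend(value)
--                 else:
--                     relationships[person][key] = value
--         else:
--             relationships[person] = rels
--
--     return relationships
-- ===== SOURCE B (Python) =====
-- def infer_grandparent_edges(relationships):
--     # Single interleaved pass over a snapshot of the persons: for each person compute its
--     # whole grandchildren list at once and apply both edge directions immediately —
--     # no temporary dict-of-dicts and no second merge phase.
--     for person, rels in list(relationships.items()):
--         grandchildren = [g
--                          for child in rels.get('PARENT_OF', [])
--                          for g in relationships[child].get('PARENT_OF', [])]
--         if grandchildren:
--             rels.setdefault('GRANDPARENT_OF', []).extend(grandchildren)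
--             for g in grandchildren:
--                 relationships.setdefault(g, {}).setdefault('GRANDCHILD_OF', []).append(person)
--     return relationships
-- ===== Notes on version B (the rewrite author's own statement) =====
-- stated objective: simpler
-- what changed: A stages all edges in a temporary nested dict-of-dicts and then merges it back in a second extend-or-create pass; B makes one interleaved pass over a snapshot of the persons, computing each person's whole grandchildren list at once and applying both edge directions to the live dict immediately, with no temporary structure and no merge phase.
-- outside the precondition, e.g. on infer_grandparent_edges({'a': {'PARENT_OF': ['b']}}): A raises KeyError, B raises KeyError
import Mathlib
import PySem

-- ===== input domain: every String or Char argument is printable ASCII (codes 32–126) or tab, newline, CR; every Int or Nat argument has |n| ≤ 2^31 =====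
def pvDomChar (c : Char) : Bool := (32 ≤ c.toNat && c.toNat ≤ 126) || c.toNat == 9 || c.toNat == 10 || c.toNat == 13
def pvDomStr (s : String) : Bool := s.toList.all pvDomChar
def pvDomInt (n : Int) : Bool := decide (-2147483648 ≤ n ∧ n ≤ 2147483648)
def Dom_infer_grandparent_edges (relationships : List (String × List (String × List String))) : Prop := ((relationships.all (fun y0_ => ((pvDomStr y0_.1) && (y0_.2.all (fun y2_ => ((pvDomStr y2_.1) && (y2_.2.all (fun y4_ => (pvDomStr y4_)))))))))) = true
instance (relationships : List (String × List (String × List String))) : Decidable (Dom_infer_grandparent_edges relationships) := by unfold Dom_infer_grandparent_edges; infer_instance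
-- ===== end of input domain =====

-- B replaces A's two phases (temp dict-of-dicts, then an extend-or-create merge pass) with ONE
-- interleaved pass over a snapshot of the persons, applying each person's grandchildren directly.
-- Python A mutates `relationships` in place and returns it; B performs the same kind of in-place
-- updates; the equivalence proved here is about the RETURN value.

-- ===== PORT A =====

-- the innermost loop body of A: the two init-and-append blocks on the temp dict
def pvA_body (temp : PySem.Dict String (PySem.Dict String (List String))) (person grandchild : String) :
    PySem.Dict String (PySem.Dict String (List String)) :=
  -- if person not in temp_relationships: temp_relationships[person] = {}
  let temp := if temp.contains person then temp else temp.insert person PySem.Dict.empty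
  -- if 'GRANDPARENT_OF' not in temp_relationships[person]: … = []
  let inner := temp.getD person PySem.Dict.empty
  let inner := if inner.contains "GRANDPARENT_OF" then inner else inner.insert "GRANDPARENT_OF" []
  -- temp_relationships[person]['GRANDPARENT_OF'].append(grandchild)
  let temp := temp.insert person (inner.insert "GRANDPARENT_OF" (inner.getD "GRANDPARENT_OF" [] ++ [grandchild]))
  -- same three steps for grandchild / 'GRANDCHILD_OF'
  let temp := if temp.contains grandchild then temp else temp.insert grandchild PySem.Dict.empty
  let ginner := temp.getD grandchild PySem.Dict.empty
  let ginner := if ginner.contains "GRANDCHILD_OF" then ginner else ginner.insert "GRANDCHILD_OF" []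
  temp.insert grandchild (ginner.insert "GRANDCHILD_OF" (ginner.getD "GRANDCHILD_OF" [] ++ [person]))

def infer_grandparent_edges (relationships : List (String × List (String × List String))) : List (String × List (String × List String)) :=
  let rel : PySem.Dict String (PySem.Dict String (List String)) :=
    PySem.Dict.mk (relationships.map (fun p => (p.1, PySem.Dict.mk p.2)))
  -- phase 1: build temp_relationships
  let temp : PySem.Dict String (PySem.Dict String (List String)) :=
    rel.items.foldl (fun temp pr =>
      if pr.2.contains "PARENT_OF" then
        (pr.2.getD "PARENT_OF" []).foldl (fun temp child =>
          -- relationships[child]; the KeyError case is excluded by Pre_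
          let crels := rel.getD child PySem.Dict.empty
          if crels.contains "PARENT_OF" then
            (crels.getD "PARENT_OF" []).foldl (fun temp grandchild => pvA_body temp pr.1 grandchild) temp
          else temp) temp
      else temp) PySem.Dict.empty
  -- phase 2: merge temp_relationships back into relationships
  let rel :=
    temp.items.foldl (fun rel pr =>
      if rel.contains pr.1 then
        pr.2.items.foldl (fun rel kv =>
          let inner := rel.getD pr.1 PySem.Dict.empty
          if inner.contains kv.1 then
            -- relationships[person][key].extend(value)
            rel.insert pr.1 (inner.insert kv.1 (inner.getD kv.1 [] ++ kv.2))
          else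
            -- relationships[person][key] = value
            rel.insert pr.1 (inner.insert kv.1 kv.2)) rel
      else rel.insert pr.1 pr.2) rel
  rel.items.map (fun p => (p.1, p.2.items))

-- ===== PORT B =====
def infer_grandparent_edges_alt (relationships : List (String × List (String × List String))) : List (String × List (String × List String)) :=
  let rel : PySem.Dict String (PySem.Dict String (List String)) :=
    PySem.Dict.mk (relationships.map (fun p => (p.1, PySem.Dict.mk p.2)))
  -- for person, rels in list(relationships.items()): snapshot of the persons; `rels` aliases the live entry
  let out := (rel.items.map Prod.fst).foldl (fun rel person =>
    let rels := rel.getD person PySem.Dict.empty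
    -- relationships[child].get('PARENT_OF', []): exact inside Pre_ (every listed child is a key)
    let grandchildren := (rels.getD "PARENT_OF" []).flatMap (fun child =>
      (rel.getD child PySem.Dict.empty).getD "PARENT_OF" [])
    if grandchildren.isEmpty then rel
    else
      -- rels.setdefault('GRANDPARENT_OF', []).extend(grandchildren)
      let rel := rel.modify person PySem.Dict.empty
        (fun i => i.modify "GRANDPARENT_OF" [] (· ++ grandchildren))
      -- relationships.setdefault(g, {}).setdefault('GRANDCHILD_OF', []).append(person)
      grandchildren.foldl (fun rel g =>
        rel.modify g PySem.Dict.empty (fun i => i.modify "GRANDCHILD_OF" [] (· ++ [person]))) rel) rel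
  out.items.map (fun p => (p.1, p.2.items))

-- ===== PRECONDITION & SPEC =====
-- Pre_ excludes (a) association lists with duplicate keys (outer or inner), which do not represent a
-- Python dict input at all, and (b) inputs where a child listed under some 'PARENT_OF' is not a key of
-- relationships, on which A raises KeyError.
def Pre_infer_grandparent_edges (relationships : List (String × List (String × List String))) : Prop :=
  (relationships.map Prod.fst).Nodup ∧
  (∀ pr ∈ relationships, (pr.2.map Prod.fst).Nodup) ∧
  (∀ pr ∈ relationships, ∀ kv ∈ pr.2, kv.1 = "PARENT_OF" → ∀ c ∈ kv.2, c ∈ relationships.map Prod.fst)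
instance (relationships : List (String × List (String × List String))) : Decidable (Pre_infer_grandparent_edges relationships) := by
  unfold Pre_infer_grandparent_edges; infer_instance

def pvWitness_infer_grandparent_edges : (List (String × List (String × List String))) :=
  [("a", [("PARENT_OF", ["b"])]), ("b", [("PARENT_OF", ["c"])]), ("c", [])]

def Spec_infer_grandparent_edges (relationships : List (String × List (String × List String))) (out : List (String × List (String × List String))) : Prop := out = infer_grandparent_edges_alt relationships
instance (relationships : List (String × List (String × List String))) (out : List (String × List (String × List String))) : Decidable (Spec_infer_grandparent_edges relationships out) := by unfold Spec_infer_grandparent_edges; infer_instance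

-- ===== CLAIM (what is proved, stated in full; the proofs are below) =====
def Claim_equal_infer_grandparent_edges : Prop := ∀ (relationships : List (String × List (String × List String))), Dom_infer_grandparent_edges relationships → Pre_infer_grandparent_edges relationships → Spec_infer_grandparent_edges relationships (infer_grandparent_edges relationships)

-- ===== LEMMAS AND PROOFS =====

-- proof-side abbreviations
def pvTmod (t : PySem.Dict String (PySem.Dict String (List String))) (p K : String) (w : List String) :
    PySem.Dict String (PySem.Dict String (List String)) :=
  t.modify p PySem.Dict.empty (fun i => i.modify K [] (· ++ w))

def pvApply (r : PySem.Dict String (PySem.Dict String (List String))) (e : String × String) :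
    PySem.Dict String (PySem.Dict String (List String)) :=
  pvTmod (pvTmod r e.1 "GRANDPARENT_OF" [e.2]) e.2 "GRANDCHILD_OF" [e.1]

-- generic loop step: both the merge loop (F = pvCombine, b0 = ∅) and the extend loop (F = (·++·), b0 = []) have this shape
def pvStep {β : Type} (F : β → β → β) (b0 : β) (d : PySem.Dict String β) (kv : String × β) :
    PySem.Dict String β :=
  d.insert kv.1 (F (d.getD kv.1 b0) kv.2)

def pvCombine (ri i : PySem.Dict String (List String)) : PySem.Dict String (List String) :=
  i.items.foldl (pvStep (· ++ ·) []) ri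

def pvMerge (rel t : PySem.Dict String (PySem.Dict String (List String))) :
    PySem.Dict String (PySem.Dict String (List String)) :=
  t.items.foldl (pvStep pvCombine PySem.Dict.empty) rel

def pvInv (t : PySem.Dict String (PySem.Dict String (List String))) : Prop :=
  t.keys.Nodup ∧ ∀ kv ∈ t.items, kv.2.keys.Nodup

-- the single inner list a person's grandchildren edges read: r[c].get('PARENT_OF', [])
def pvParentOf (r : PySem.Dict String (PySem.Dict String (List String))) (c : String) : List String :=
  (r.getD c PySem.Dict.empty).getD "PARENT_OF" []

theorem pv_insert_insert_comm {β : Type} (d : PySem.Dict String β) (p q : String) (a b : β)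
    (hne : q ≠ p) (hp : d.contains p = true) :
    (d.insert p a).insert q b = (d.insert q b).insert p a := by
  have hqp : (q == p) = false := beq_eq_false_iff_ne.mpr hne
  have hpq : (p == q) = false := beq_eq_false_iff_ne.mpr (Ne.symm hne)
  have hp2 : (d.insert q b).contains p = true := by
    rw [PySem.Dict.contains_insert]; simp [hp]
  by_cases hq : d.contains q = true
  · have hq2 : (d.insert p a).contains q = true := by
      rw [PySem.Dict.contains_insert]; simp [hq]
    apply PySem.Dict.ext
    rw [PySem.Dict.items_insert_of_contains _ _ hq2,
        PySem.Dict.items_insert_of_contains _ _ hp,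
        PySem.Dict.items_insert_of_contains _ _ hp2,
        PySem.Dict.items_insert_of_contains _ _ hq]
    simp only [List.map_map]
    apply List.map_congr_left
    intro pr _
    by_cases h1 : pr.1 = p <;> by_cases h2 : pr.1 = q <;>
      simp_all [Function.comp]
  · have hq' : d.contains q = false := by simpa using hq
    have hq2 : (d.insert p a).contains q = false := by
      rw [PySem.Dict.contains_insert]; simp [hq', hqp]
    apply PySem.Dict.ext
    rw [PySem.Dict.items_insert_of_not_contains _ _ hq2,
        PySem.Dict.items_insert_of_contains _ _ hp,
        PySem.Dict.items_insert_of_contains _ _ hp2,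
        PySem.Dict.items_insert_of_not_contains _ _ hq']
    simp only [List.map_append]
    simp
    exact fun h => absurd h hne

theorem pv_insert_getD_self {β : Type} (d : PySem.Dict String β) (p : String) (dflt : β)
    (hnd : d.keys.Nodup) (hp : d.contains p = true) :
    d.insert p (d.getD p dflt) = d := by
  apply PySem.Dict.ext
  rw [PySem.Dict.items_insert_of_contains _ _ hp]
  conv_rhs => rw [← List.map_id d.items]
  apply List.map_congr_left
  intro pr hmem
  by_cases h1 : pr.1 = p
  · have hm : (p, pr.2) ∈ d.items := by rw [← h1]; exact hmem
    have hg := PySem.Dict.getD_of_mem_items _ hm hnd dflt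
    simp only [h1, beq_self_eq_true, if_true, hg, id]
    rw [← h1]
  · simp [h1]

theorem pv_foldl_step_insert {β : Type} (F : β → β → β) (b0 : β) (l : List (String × β))
    (d : PySem.Dict String β) (p : String) (a : β)
    (hl : ∀ kv ∈ l, kv.1 ≠ p) (hp : d.contains p = true) :
    l.foldl (pvStep F b0) (d.insert p a) = (l.foldl (pvStep F b0) d).insert p a := by
  induction l generalizing d with
  | nil => rfl
  | cons kv rest ih =>
    have hne : kv.1 ≠ p := hl kv (by simp)
    simp only [List.foldl_cons]
    have h1 : pvStep F b0 (d.insert p a) kv = (pvStep F b0 d kv).insert p a := by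
      unfold pvStep
      rw [PySem.Dict.getD_insert_of_ne _ _ _ hne]
      exact pv_insert_insert_comm d p kv.1 a _ hne hp
    rw [h1]
    exact ih _ (fun kv h => hl kv (by simp [h])) (by unfold pvStep; rw [PySem.Dict.contains_insert]; simp [hp])

theorem pv_foldl_step_getD {β : Type} (F : β → β → β) (b0 : β) (l : List (String × β))
    (d : PySem.Dict String β) (p : String)
    (hl : ∀ kv ∈ l, kv.1 ≠ p) :
    (l.foldl (pvStep F b0) d).getD p b0 = d.getD p b0 := by
  induction l generalizing d with
  | nil => rfl
  | cons kv rest ih =>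
    simp only [List.foldl_cons]
    rw [ih _ (fun kv h => hl kv (by simp [h]))]
    exact PySem.Dict.getD_insert_of_ne _ _ _ (Ne.symm (hl kv (by simp)))

theorem pv_gen {β : Type} (F : β → β → β) (b0 : β) (tr : β → β) (P : β → Prop) (p : String)
    (hfresh : ∀ a, F a (tr b0) = tr a)
    (hcomm : ∀ a x, P x → F a (tr x) = tr (F a x))
    (ts : List (String × β)) (hnd : (ts.map Prod.fst).Nodup) (hP : ∀ kv ∈ ts, P kv.2)
    (rel : PySem.Dict String β) :
    ((PySem.Dict.mk ts).modify p b0 tr).items.foldl (pvStep F b0) rel =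
      (ts.foldl (pvStep F b0) rel).insert p (tr ((ts.foldl (pvStep F b0) rel).getD p b0)) := by
  induction ts generalizing rel with
  | nil =>
    have hc : (PySem.Dict.mk ([] : List (String × β))).contains p = false := by
      simp [PySem.Dict.contains]
    simp only [PySem.Dict.modify, PySem.Dict.getD_of_not_contains _ _ hc,
      PySem.Dict.items_insert_of_not_contains _ _ hc]
    simp only [List.foldl, List.nil_append, List.foldl_cons]
    unfold pvStep
    rw [hfresh]
  | cons qv rest ih =>
    by_cases hqp : qv.1 = p
    · -- head is the modified key
      have hrest : ∀ kv ∈ rest, kv.1 ≠ p := by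
        intro kv hm
        simp only [List.map_cons, List.nodup_cons] at hnd
        intro h; exact hnd.1 (by rw [hqp, ← h]; exact List.mem_map_of_mem hm)
      have hc : (PySem.Dict.mk (qv :: rest)).contains p = true := by
        simp [PySem.Dict.contains, hqp]
      have hg : (PySem.Dict.mk (qv :: rest)).getD p b0 = qv.2 := by
        simp [PySem.Dict.getD, PySem.Dict.get?, List.find?, hqp]
      have hitems : ((PySem.Dict.mk (qv :: rest)).modify p b0 tr).items = (p, tr qv.2) :: rest := by
        simp only [PySem.Dict.modify, PySem.Dict.items_insert_of_contains _ _ hc, hg]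
        simp only [List.map_cons, hqp, beq_self_eq_true, if_true]
        congr 1
        conv_rhs => rw [← List.map_id rest]
        apply List.map_congr_left
        intro kv hm
        simp [beq_eq_false_iff_ne.mpr (hrest kv hm)]
      rw [hitems]
      simp only [List.foldl_cons]
      have hstep : pvStep F b0 rel (p, tr qv.2) =
          (pvStep F b0 rel (p, qv.2)).insert p (tr ((pvStep F b0 rel (p, qv.2)).getD p b0)) := by
        unfold pvStep
        rw [hcomm _ _ (hP qv (by simp))]
        rw [PySem.Dict.getD_insert_self, PySem.Dict.insert_insert_self]
      rw [hstep]
      have hcontains : (pvStep F b0 rel (p, qv.2)).contains p = true := by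
        unfold pvStep; rw [PySem.Dict.contains_insert]; simp
      rw [pv_foldl_step_insert F b0 rest _ p _ hrest hcontains]
      rw [pv_foldl_step_getD F b0 rest _ p hrest]
      have : qv = (p, qv.2) := by rw [← hqp]
      rw [← this]
    · -- head key differs from p
      have hitems : ((PySem.Dict.mk (qv :: rest)).modify p b0 tr).items =
          qv :: ((PySem.Dict.mk rest).modify p b0 tr).items := by
        have hqpb : (qv.1 == p) = false := beq_eq_false_iff_ne.mpr hqp
        by_cases hc : (PySem.Dict.mk rest).contains p = true
        · have hc2 : (PySem.Dict.mk (qv :: rest)).contains p = true := by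
            simp only [PySem.Dict.contains] at hc ⊢; simp [hc]
          have hg : (PySem.Dict.mk (qv :: rest)).getD p b0 = (PySem.Dict.mk rest).getD p b0 := by
            simp [PySem.Dict.getD, PySem.Dict.get?, List.find?, hqpb]
          simp only [PySem.Dict.modify, PySem.Dict.items_insert_of_contains _ _ hc2,
            PySem.Dict.items_insert_of_contains _ _ hc, hg, List.map_cons, hqpb,
            Bool.false_eq_true, if_false]
        · have hc' : (PySem.Dict.mk rest).contains p = false := Bool.eq_false_iff.mpr hc
          have hc2 : (PySem.Dict.mk (qv :: rest)).contains p = false := by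
            simp only [PySem.Dict.contains, List.any_cons]
            simp only [PySem.Dict.contains] at hc'
            rw [hc', hqpb]; simp
          have hg : (PySem.Dict.mk (qv :: rest)).getD p b0 = b0 :=
            PySem.Dict.getD_of_not_contains _ _ hc2
          have hg' : (PySem.Dict.mk rest).getD p b0 = b0 :=
            PySem.Dict.getD_of_not_contains _ _ hc'
          simp only [PySem.Dict.modify, PySem.Dict.items_insert_of_not_contains _ _ hc2,
            PySem.Dict.items_insert_of_not_contains _ _ hc', hg, hg', List.cons_append]
      rw [hitems]
      simp only [List.foldl_cons]
      exact ih (by simpa using (List.nodup_cons.mp (by simpa using hnd)).2)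
        (fun kv hm => hP kv (by simp [hm])) (pvStep F b0 rel qv)

-- pv_gen instantiated one level down: extending one key of i commutes with pvCombine
theorem pv_combine_modify (a x : PySem.Dict String (List String)) (K : String) (w : List String)
    (hx : x.keys.Nodup) :
    pvCombine a (x.modify K [] (· ++ w)) = (pvCombine a x).modify K [] (· ++ w) := by
  have h := pv_gen (β := List String) (· ++ ·) [] (· ++ w) (fun _ => True) K
    (fun a => by simp) (fun a _ _ => by simp)
    x.items (by simpa using hx) (fun _ _ => trivial) a
  simpa [pvCombine, PySem.Dict.modify] using h

-- the central commutation: merging a modified temp = merge, then modify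
theorem pv_merge_tmod (t rel : PySem.Dict String (PySem.Dict String (List String)))
    (p K : String) (w : List String) (hinv : pvInv t) :
    pvMerge rel (pvTmod t p K w) = pvTmod (pvMerge rel t) p K w := by
  have h := pv_gen (β := PySem.Dict String (List String)) pvCombine PySem.Dict.empty
    (fun i => i.modify K [] (· ++ w)) (fun i => i.keys.Nodup) p
    (fun a => by
      simp [pvCombine, PySem.Dict.modify, PySem.Dict.empty, PySem.Dict.getD,
        PySem.Dict.get?, PySem.Dict.insert, PySem.Dict.contains, pvStep])
    (fun a x hx => pv_combine_modify a x K w hx)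
    t.items (by simpa using hinv.1) hinv.2 rel
  simpa [pvMerge, pvTmod, PySem.Dict.modify] using h

theorem pv_getD_keys_nodup (t : PySem.Dict String (PySem.Dict String (List String)))
    (p : String) (hinv : pvInv t) : (t.getD p PySem.Dict.empty).keys.Nodup := by
  rcases h : t.get? p with _ | v
  · rw [PySem.Dict.getD_eq_get?_getD, h]
    simp [PySem.Dict.empty, PySem.Dict.keys]
  · rw [PySem.Dict.getD_eq_get?_getD, h]
    exact hinv.2 (p, v) (PySem.Dict.mem_items_of_get?_eq_some _ h)

theorem pv_inv_tmod (t : PySem.Dict String (PySem.Dict String (List String)))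
    (p K : String) (w : List String) (hinv : pvInv t) : pvInv (pvTmod t p K w) := by
  constructor
  · exact PySem.Dict.nodup_keys_insert _ _ _ hinv.1
  · intro kv hm
    rw [pvTmod, PySem.Dict.modify] at hm
    rcases (PySem.Dict.mem_items_insert _ _ _ _).mp hm with h | h
    · subst h
      exact PySem.Dict.nodup_keys_insert _ _ _ (pv_getD_keys_nodup t p hinv)
    · exact hinv.2 kv h.1

theorem pv_inv_apply (t : PySem.Dict String (PySem.Dict String (List String)))
    (e : String × String) (hinv : pvInv t) : pvInv (pvApply t e) :=
  pv_inv_tmod _ _ _ _ (pv_inv_tmod _ _ _ _ hinv)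

theorem pv_merge_apply (t rel : PySem.Dict String (PySem.Dict String (List String)))
    (e : String × String) (hinv : pvInv t) :
    pvMerge rel (pvApply t e) = pvApply (pvMerge rel t) e := by
  unfold pvApply
  rw [pv_merge_tmod _ _ _ _ _ (pv_inv_tmod _ _ _ _ hinv), pv_merge_tmod _ _ _ _ _ hinv]

theorem pv_merge_foldl (E : List (String × String))
    (t rel : PySem.Dict String (PySem.Dict String (List String))) (hinv : pvInv t) :
    pvMerge rel (E.foldl pvApply t) = E.foldl pvApply (pvMerge rel t) := by
  induction E generalizing t with
  | nil => rfl
  | cons e E ih =>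
    simp only [List.foldl_cons]
    rw [ih _ (pv_inv_apply t e hinv), pv_merge_apply _ _ _ hinv]

-- A's innermost body is two applications of the same init-and-append shape
def pvHalf (t : PySem.Dict String (PySem.Dict String (List String))) (p K : String) (w : List String) :
    PySem.Dict String (PySem.Dict String (List String)) :=
  let t1 := if t.contains p then t else t.insert p PySem.Dict.empty
  let i := t1.getD p PySem.Dict.empty
  let i2 := if i.contains K then i else i.insert K []
  t1.insert p (i2.insert K (i2.getD K [] ++ w))

theorem pv_half_eq (t : PySem.Dict String (PySem.Dict String (List String)))
    (p K : String) (w : List String) : pvHalf t p K w = pvTmod t p K w := by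
  have inner : ∀ i : PySem.Dict String (List String),
      (if i.contains K then i else i.insert K []).insert K
        ((if i.contains K then i else i.insert K []).getD K [] ++ w) =
      i.insert K (i.getD K [] ++ w) := by
    intro i
    by_cases hK : i.contains K = true
    · simp [hK]
    · have hK' : i.contains K = false := Bool.eq_false_iff.mpr hK
      rw [if_neg (by simp [hK'])]
      rw [PySem.Dict.getD_insert_self, PySem.Dict.insert_insert_self,
        PySem.Dict.getD_of_not_contains _ _ hK']
  by_cases hp : t.contains p = true
  · simp only [pvHalf, pvTmod, PySem.Dict.modify, if_pos hp]
    exact congrArg _ (inner _)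
  · have hp' : t.contains p = false := Bool.eq_false_iff.mpr hp
    simp only [pvHalf, pvTmod, PySem.Dict.modify, if_neg hp]
    rw [PySem.Dict.getD_insert_self, PySem.Dict.insert_insert_self,
      PySem.Dict.getD_of_not_contains _ _ hp']
    exact congrArg _ (inner _)

theorem pv_body_eq (t : PySem.Dict String (PySem.Dict String (List String))) (p gc : String) :
    pvA_body t p gc = pvApply t (p, gc) := by
  show pvHalf (pvHalf t p "GRANDPARENT_OF" [gc]) gc "GRANDCHILD_OF" [p] = _
  rw [pv_half_eq, pv_half_eq]; rfl

-- pvCombine from an empty accumulator rebuilds the dict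
theorem pv_combine_fresh (l : List (String × List String)) (acc : PySem.Dict String (List String))
    (hfr : ∀ kv ∈ l, acc.contains kv.1 = false) (hnd : (l.map Prod.fst).Nodup) :
    l.foldl (pvStep (· ++ ·) []) acc = PySem.Dict.mk (acc.items ++ l) := by
  induction l generalizing acc with
  | nil => simp
  | cons kv rest ih =>
    simp only [List.foldl_cons]
    have hk : acc.contains kv.1 = false := hfr kv (by simp)
    have hstep : pvStep (· ++ ·) [] acc kv = PySem.Dict.mk (acc.items ++ [kv]) := by
      unfold pvStep
      rw [PySem.Dict.getD_of_not_contains _ _ hk]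
      apply PySem.Dict.ext
      rw [PySem.Dict.items_insert_of_not_contains _ _ hk]
      simp
    rw [hstep, ih]
    · simp
    · intro kv' hm
      show (PySem.Dict.mk (acc.items ++ [kv])).contains kv'.1 = false
      simp only [PySem.Dict.contains, List.any_append, List.any_cons, List.any_nil]
      have h1 : acc.items.any (fun p => p.1 == kv'.1) = false := by
        have := hfr kv' (by simp [hm])
        simpa [PySem.Dict.contains] using this
      have h2 : (kv.1 == kv'.1) = false := by
        simp only [List.map_cons, List.nodup_cons] at hnd
        exact beq_eq_false_iff_ne.mpr (fun h => hnd.1 (h ▸ List.mem_map_of_mem hm))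
      simp [h1, h2]
    · simpa using (List.nodup_cons.mp (by simpa using hnd)).2

theorem pv_combine_empty (i : PySem.Dict String (List String)) (hnd : i.keys.Nodup) :
    pvCombine PySem.Dict.empty i = i := by
  rw [pvCombine, pv_combine_fresh i.items PySem.Dict.empty
    (fun _ _ => rfl) (by simpa using hnd)]
  rfl

-- A's literal merge loop = pvMerge
theorem pv_inner_merge (p : String) (l : List (String × List String))
    (rel : PySem.Dict String (PySem.Dict String (List String)))
    (hc : rel.contains p = true) (hnd : rel.keys.Nodup) :
    l.foldl (fun rel kv =>
      let inner := rel.getD p PySem.Dict.empty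
      if inner.contains kv.1 then
        rel.insert p (inner.insert kv.1 (inner.getD kv.1 [] ++ kv.2))
      else
        rel.insert p (inner.insert kv.1 kv.2)) rel =
    rel.insert p (l.foldl (pvStep (· ++ ·) []) (rel.getD p PySem.Dict.empty)) := by
  induction l generalizing rel with
  | nil => exact (pv_insert_getD_self _ _ _ hnd hc).symm
  | cons kv rest ih =>
    simp only [List.foldl_cons]
    have hbody : (let inner := rel.getD p PySem.Dict.empty
        if inner.contains kv.1 then
          rel.insert p (inner.insert kv.1 (inner.getD kv.1 [] ++ kv.2))
        else
          rel.insert p (inner.insert kv.1 kv.2)) =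
        rel.insert p (pvStep (· ++ ·) [] (rel.getD p PySem.Dict.empty) kv) := by
      show (if (rel.getD p PySem.Dict.empty).contains kv.1 then _ else _) = _
      by_cases hK : (rel.getD p PySem.Dict.empty).contains kv.1 = true
      · rw [if_pos hK]; rfl
      · have hK' : (rel.getD p PySem.Dict.empty).contains kv.1 = false := Bool.eq_false_iff.mpr hK
        rw [if_neg hK]
        unfold pvStep
        rw [PySem.Dict.getD_of_not_contains _ _ hK']
        simp
    rw [hbody]
    rw [ih _ (by rw [PySem.Dict.contains_insert]; simp)
      (PySem.Dict.nodup_keys_insert _ _ _ hnd)]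
    rw [PySem.Dict.getD_insert_self, PySem.Dict.insert_insert_self]

theorem pv_merge_lit (ts : List (String × PySem.Dict String (List String)))
    (rel : PySem.Dict String (PySem.Dict String (List String)))
    (hnd : rel.keys.Nodup) (hP : ∀ kv ∈ ts, kv.2.keys.Nodup) :
    ts.foldl (fun rel pr =>
      if rel.contains pr.1 then
        pr.2.items.foldl (fun rel kv =>
          let inner := rel.getD pr.1 PySem.Dict.empty
          if inner.contains kv.1 then
            rel.insert pr.1 (inner.insert kv.1 (inner.getD kv.1 [] ++ kv.2))
          else
            rel.insert pr.1 (inner.insert kv.1 kv.2)) rel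
      else rel.insert pr.1 pr.2) rel =
    ts.foldl (pvStep pvCombine PySem.Dict.empty) rel := by
  induction ts generalizing rel with
  | nil => rfl
  | cons pr rest ih =>
    simp only [List.foldl_cons]
    have hstep : (if rel.contains pr.1 then
        pr.2.items.foldl (fun rel kv =>
          let inner := rel.getD pr.1 PySem.Dict.empty
          if inner.contains kv.1 then
            rel.insert pr.1 (inner.insert kv.1 (inner.getD kv.1 [] ++ kv.2))
          else
            rel.insert pr.1 (inner.insert kv.1 kv.2)) rel
      else rel.insert pr.1 pr.2) = pvStep pvCombine PySem.Dict.empty rel pr := by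
      by_cases hc : rel.contains pr.1 = true
      · rw [if_pos hc, pv_inner_merge _ _ _ hc hnd]; rfl
      · have hc' : rel.contains pr.1 = false := Bool.eq_false_iff.mpr hc
        rw [if_neg hc]
        unfold pvStep
        rw [PySem.Dict.getD_of_not_contains _ _ hc',
          pv_combine_empty _ (hP pr (by simp))]
    rw [hstep]
    exact ih _ (PySem.Dict.nodup_keys_insert _ _ _ hnd) (fun kv hm => hP kv (by simp [hm]))

theorem pv_inv_foldl_apply (E : List (String × String))
    (t : PySem.Dict String (PySem.Dict String (List String))) (hinv : pvInv t) :
    pvInv (E.foldl pvApply t) := by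
  induction E generalizing t with
  | nil => exact hinv
  | cons e E ih => exact ih _ (pv_inv_apply t e hinv)

theorem pv_inv_empty : pvInv PySem.Dict.empty :=
  ⟨by simp [PySem.Dict.empty, PySem.Dict.keys], by intro kv hm; simp [PySem.Dict.empty] at hm⟩

-- the collapsed phase-1 loop: the membership guards vanish because getD defaults to []
theorem pv_phase1_eq (rel : PySem.Dict String (PySem.Dict String (List String))) :
    rel.items.foldl (fun temp pr =>
      if pr.2.contains "PARENT_OF" then
        (pr.2.getD "PARENT_OF" []).foldl (fun temp child =>
          let crels := rel.getD child PySem.Dict.empty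
          if crels.contains "PARENT_OF" then
            (crels.getD "PARENT_OF" []).foldl (fun temp grandchild => pvA_body temp pr.1 grandchild) temp
          else temp) temp
      else temp) PySem.Dict.empty =
    (rel.items.flatMap (fun pr =>
      (pr.2.getD "PARENT_OF" []).flatMap (fun child =>
        ((rel.getD child PySem.Dict.empty).getD "PARENT_OF" []).map (fun gc => (pr.1, gc))))).foldl
      pvApply PySem.Dict.empty := by
  rw [List.foldl_flatMap]
  apply PySem.List.foldl_congr_mem
  intro temp pr _
  have houter : ∀ t0 : PySem.Dict String (PySem.Dict String (List String)),
      (pr.2.getD "PARENT_OF" []).foldl (fun temp child =>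
        let crels := rel.getD child PySem.Dict.empty
        if crels.contains "PARENT_OF" then
          (crels.getD "PARENT_OF" []).foldl (fun temp grandchild => pvA_body temp pr.1 grandchild) temp
        else temp) t0 =
      ((pr.2.getD "PARENT_OF" []).flatMap (fun child =>
        ((rel.getD child PySem.Dict.empty).getD "PARENT_OF" []).map (fun gc => (pr.1, gc)))).foldl
        pvApply t0 := by
    intro t0
    rw [List.foldl_flatMap]
    apply PySem.List.foldl_congr_mem
    intro t1 child _
    show (if (rel.getD child PySem.Dict.empty).contains "PARENT_OF" then _ else _) = _
    rw [List.foldl_map]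
    have hinner : ((rel.getD child PySem.Dict.empty).getD "PARENT_OF" []).foldl
        (fun temp grandchild => pvA_body temp pr.1 grandchild) t1 =
        ((rel.getD child PySem.Dict.empty).getD "PARENT_OF" []).foldl
        (fun t gc => pvApply t (pr.1, gc)) t1 := by
      apply PySem.List.foldl_congr_mem
      intro t2 gc _
      exact pv_body_eq t2 pr.1 gc
    by_cases hc : (rel.getD child PySem.Dict.empty).contains "PARENT_OF" = true
    · rw [if_pos hc]; exact hinner
    · have hc' : (rel.getD child PySem.Dict.empty).contains "PARENT_OF" = false :=
        Bool.eq_false_iff.mpr hc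
      rw [if_neg hc, PySem.Dict.getD_of_not_contains _ _ hc']
      rfl
  show (if pr.2.contains "PARENT_OF" then _ else _) = _
  by_cases hc : pr.2.contains "PARENT_OF" = true
  · rw [if_pos hc]; exact houter temp
  · have hc' : pr.2.contains "PARENT_OF" = false := Bool.eq_false_iff.mpr hc
    rw [if_neg hc, PySem.Dict.getD_of_not_contains _ _ hc']
    rfl

-- ===== B-side lemmas: the interleaved pass equals the per-edge fold =====

theorem pv_contains_tmod (r : PySem.Dict String (PySem.Dict String (List String)))
    (q K : String) (w : List String) (c : String) :
    (pvTmod r q K w).contains c = (c == q || r.contains c) := by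
  simp [pvTmod, PySem.Dict.modify, PySem.Dict.contains_insert]

theorem pv_contains_apply (r : PySem.Dict String (PySem.Dict String (List String)))
    (e : String × String) (c : String) (h : r.contains c = true) :
    (pvApply r e).contains c = true := by
  simp [pvApply, pv_contains_tmod, h]

theorem pv_contains_foldl (E : List (String × String))
    (r : PySem.Dict String (PySem.Dict String (List String))) (c : String)
    (h : r.contains c = true) : (E.foldl pvApply r).contains c = true := by
  induction E generalizing r with
  | nil => exact h
  | cons e E ih => exact ih _ (pv_contains_apply r e c h)

theorem pv_parent_tmod (r : PySem.Dict String (PySem.Dict String (List String)))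
    (q K : String) (w : List String) (c : String) (hK : K ≠ "PARENT_OF") :
    pvParentOf (pvTmod r q K w) c = pvParentOf r c := by
  unfold pvParentOf
  by_cases hc : c = q
  · subst hc
    simp only [pvTmod, PySem.Dict.modify, PySem.Dict.getD_insert_self]
    exact PySem.Dict.getD_insert_of_ne _ _ _ (Ne.symm hK)
  · simp only [pvTmod, PySem.Dict.modify]
    rw [PySem.Dict.getD_insert_of_ne _ _ _ hc]

theorem pv_parent_apply (r : PySem.Dict String (PySem.Dict String (List String)))
    (e : String × String) (c : String) :
    pvParentOf (pvApply r e) c = pvParentOf r c := by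
  unfold pvApply
  rw [pv_parent_tmod _ _ _ _ _ (by decide), pv_parent_tmod _ _ _ _ _ (by decide)]

theorem pv_parent_foldl (E : List (String × String))
    (r : PySem.Dict String (PySem.Dict String (List String))) (c : String) :
    pvParentOf (E.foldl pvApply r) c = pvParentOf r c := by
  induction E generalizing r with
  | nil => rfl
  | cons e E ih => rw [List.foldl_cons, ih, pv_parent_apply]

theorem pv_tmod_split (r : PySem.Dict String (PySem.Dict String (List String)))
    (p K : String) (w1 w2 : List String) :
    pvTmod r p K (w1 ++ w2) = pvTmod (pvTmod r p K w1) p K w2 := by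
  simp only [pvTmod, PySem.Dict.modify, PySem.Dict.getD_insert_self, PySem.Dict.insert_insert_self]
  congr 1
  rw [List.append_assoc]

theorem pv_gp_present_tmod (r : PySem.Dict String (PySem.Dict String (List String)))
    (p : String) (w : List String) :
    ((pvTmod r p "GRANDPARENT_OF" w).getD p PySem.Dict.empty).contains "GRANDPARENT_OF" = true := by
  simp only [pvTmod, PySem.Dict.modify, PySem.Dict.getD_insert_self]
  exact PySem.Dict.contains_insert_self _ _ _

theorem pv_gp_preserved (r : PySem.Dict String (PySem.Dict String (List String)))
    (g p : String) (u : List String)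
    (h : ((r.getD p PySem.Dict.empty).contains "GRANDPARENT_OF") = true) :
    (((pvTmod r g "GRANDCHILD_OF" u).getD p PySem.Dict.empty).contains "GRANDPARENT_OF") = true := by
  by_cases hpg : p = g
  · subst hpg
    simp [pvTmod, PySem.Dict.modify, PySem.Dict.getD_insert_self, PySem.Dict.contains_insert, h]
  · simp only [pvTmod, PySem.Dict.modify]
    rw [PySem.Dict.getD_insert_of_ne _ _ _ hpg]
    exact h

-- the two modifies of one edge commute past a later GRANDPARENT_OF-extend of the same grandparent
theorem pv_tmod_comm (r : PySem.Dict String (PySem.Dict String (List String)))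
    (g p q : String) (w : List String)
    (hp : r.contains p = true)
    (hgp : (r.getD p PySem.Dict.empty).contains "GRANDPARENT_OF" = true) :
    pvTmod (pvTmod r g "GRANDCHILD_OF" [q]) p "GRANDPARENT_OF" w
      = pvTmod (pvTmod r p "GRANDPARENT_OF" w) g "GRANDCHILD_OF" [q] := by
  by_cases hgpq : g = p
  · subst hgpq
    simp only [pvTmod, PySem.Dict.modify, PySem.Dict.getD_insert_self, PySem.Dict.insert_insert_self]
    congr 1
    rw [PySem.Dict.getD_insert_of_ne _ _ _ (by decide : ("GRANDPARENT_OF" : String) ≠ "GRANDCHILD_OF"),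
        PySem.Dict.getD_insert_of_ne _ _ _ (by decide : ("GRANDCHILD_OF" : String) ≠ "GRANDPARENT_OF")]
    exact (pv_insert_insert_comm (r.getD g PySem.Dict.empty) "GRANDPARENT_OF" "GRANDCHILD_OF" _ _
      (by decide) hgp).symm
  · simp only [pvTmod, PySem.Dict.modify]
    rw [PySem.Dict.getD_insert_of_ne _ _ _ (Ne.symm hgpq),
        PySem.Dict.getD_insert_of_ne _ _ _ hgpq]
    exact (pv_insert_insert_comm r p g _ _ hgpq hp).symm

-- one person's grouped update (GP-extend once, then all GC-appends) = the per-edge fold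
theorem pv_group (p : String) (gs : List String) :
    ∀ (r : PySem.Dict String (PySem.Dict String (List String))), pvInv r → r.contains p = true →
      (r.getD p PySem.Dict.empty).contains "GRANDPARENT_OF" = true →
      gs.foldl (fun rc g => pvTmod rc g "GRANDCHILD_OF" [p]) (pvTmod r p "GRANDPARENT_OF" gs)
        = gs.foldl (fun rc g => pvApply rc (p, g)) r := by
  induction gs with
  | nil =>
    intro r hinv hp hgp
    simp only [List.foldl_nil]
    show pvTmod r p "GRANDPARENT_OF" [] = r
    simp only [pvTmod, PySem.Dict.modify, List.append_nil]
    rw [pv_insert_getD_self (r.getD p PySem.Dict.empty) "GRANDPARENT_OF" []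
      (pv_getD_keys_nodup r p hinv) hgp]
    exact pv_insert_getD_self r p PySem.Dict.empty hinv.1 hp
  | cons g gs ih =>
    intro r hinv hp _
    simp only [List.foldl_cons]
    have hsplit : pvTmod r p "GRANDPARENT_OF" (g :: gs)
        = pvTmod (pvTmod r p "GRANDPARENT_OF" [g]) p "GRANDPARENT_OF" gs := by
      simpa using pv_tmod_split r p "GRANDPARENT_OF" [g] gs
    rw [hsplit]
    have hp1 : (pvTmod r p "GRANDPARENT_OF" [g]).contains p = true := by
      rw [pv_contains_tmod]; simp [hp]
    have hgp1 := pv_gp_present_tmod r p [g]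
    rw [← pv_tmod_comm (pvTmod r p "GRANDPARENT_OF" [g]) g p p gs hp1 hgp1]
    exact ih (pvApply r (p, g)) (pv_inv_apply r (p, g) hinv)
      (by
        show (pvTmod (pvTmod r p "GRANDPARENT_OF" [g]) g "GRANDCHILD_OF" [p]).contains p = true
        rw [pv_contains_tmod]; simp [hp1])
      (pv_gp_preserved (pvTmod r p "GRANDPARENT_OF" [g]) g p [p] hgp1)

theorem pv_group_full (p g : String) (gs : List String)
    (r : PySem.Dict String (PySem.Dict String (List String)))
    (hinv : pvInv r) (hp : r.contains p = true) :
    (g :: gs).foldl (fun rc gg => pvTmod rc gg "GRANDCHILD_OF" [p])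
        (pvTmod r p "GRANDPARENT_OF" (g :: gs))
      = (g :: gs).foldl (fun rc gg => pvApply rc (p, gg)) r := by
  simp only [List.foldl_cons]
  have hsplit : pvTmod r p "GRANDPARENT_OF" (g :: gs)
      = pvTmod (pvTmod r p "GRANDPARENT_OF" [g]) p "GRANDPARENT_OF" gs := by
    simpa using pv_tmod_split r p "GRANDPARENT_OF" [g] gs
  rw [hsplit]
  have hp1 : (pvTmod r p "GRANDPARENT_OF" [g]).contains p = true := by
    rw [pv_contains_tmod]; simp [hp]
  have hgp1 := pv_gp_present_tmod r p [g]
  rw [← pv_tmod_comm (pvTmod r p "GRANDPARENT_OF" [g]) g p p gs hp1 hgp1]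
  exact pv_group p gs (pvApply r (p, g)) (pv_inv_apply r (p, g) hinv)
    (by
      show (pvTmod (pvTmod r p "GRANDPARENT_OF" [g]) g "GRANDCHILD_OF" [p]).contains p = true
      rw [pv_contains_tmod]; simp [hp1])
    (pv_gp_preserved (pvTmod r p "GRANDPARENT_OF" [g]) g p [p] hgp1)

-- B's whole pass = the per-edge fold over the edges read off the ORIGINAL dict
theorem pv_bpass (rel : PySem.Dict String (PySem.Dict String (List String)))
    (ps : List String) :
    ∀ (r : PySem.Dict String (PySem.Dict String (List String))), pvInv r →
      (∀ c, pvParentOf r c = pvParentOf rel c) →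
      (∀ p ∈ ps, r.contains p = true) →
      ps.foldl (fun rcur person =>
        let rels := rcur.getD person PySem.Dict.empty
        let grandchildren := (rels.getD "PARENT_OF" []).flatMap (fun child =>
          (rcur.getD child PySem.Dict.empty).getD "PARENT_OF" [])
        if grandchildren.isEmpty then rcur
        else
          let rcur := rcur.modify person PySem.Dict.empty
            (fun i => i.modify "GRANDPARENT_OF" [] (· ++ grandchildren))
          grandchildren.foldl (fun rcur g =>
            rcur.modify g PySem.Dict.empty (fun i => i.modify "GRANDCHILD_OF" [] (· ++ [person]))) rcur) r
      = (ps.flatMap (fun p =>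
          ((pvParentOf rel p).flatMap (fun child => pvParentOf rel child)).map
            (fun gc => (p, gc)))).foldl pvApply r := by
  induction ps with
  | nil => intro r _ _ _; rfl
  | cons p ps ih =>
    intro r hinv hpar hcont
    simp only [List.foldl_cons, List.flatMap_cons, List.foldl_append]
    have hgk : ((r.getD p PySem.Dict.empty).getD "PARENT_OF" []).flatMap (fun child =>
        (r.getD child PySem.Dict.empty).getD "PARENT_OF" [])
        = (pvParentOf rel p).flatMap (fun child => pvParentOf rel child) := by
      rw [show ((r.getD p PySem.Dict.empty).getD "PARENT_OF" []) = pvParentOf r p from rfl, hpar p]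
      congr 1
      funext c
      exact hpar c
    rw [hgk]
    rcases hcase : (pvParentOf rel p).flatMap (fun child => pvParentOf rel child) with _ | ⟨g, gs⟩
    · simp only [List.isEmpty_nil, List.map_nil, List.foldl_nil, if_true]
      exact ih r hinv hpar (fun q hq => hcont q (List.mem_cons_of_mem _ hq))
    · simp only [List.isEmpty_cons, Bool.false_eq_true, if_false]
      have hstep : (g :: gs).foldl (fun rcur gg =>
            rcur.modify gg PySem.Dict.empty (fun i => i.modify "GRANDCHILD_OF" [] (· ++ [p])))
            (r.modify p PySem.Dict.empty (fun i => i.modify "GRANDPARENT_OF" [] (· ++ (g :: gs))))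
          = ((g :: gs).map (fun gc => (p, gc))).foldl pvApply r := by
        rw [List.foldl_map]
        exact pv_group_full p g gs r hinv (hcont p (List.mem_cons_self ..))
      rw [hstep]
      exact ih _ (pv_inv_foldl_apply _ _ hinv)
        (fun c => (pv_parent_foldl _ _ c).trans (hpar c))
        (fun q hq => pv_contains_foldl _ _ q (hcont q (List.mem_cons_of_mem _ hq)))

-- ===== VERDICT (by name: the statement is the Claim_ definition above) =====
theorem infer_grandparent_edges_spec : Claim_equal_infer_grandparent_edges := by
  intro relationships _ hpre
  unfold Spec_infer_grandparent_edges infer_grandparent_edges infer_grandparent_edges_alt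
  simp only []
  set rel : PySem.Dict String (PySem.Dict String (List String)) :=
    PySem.Dict.mk (relationships.map (fun p => (p.1, PySem.Dict.mk p.2))) with hrel
  have hnd : rel.keys.Nodup := by
    rw [hrel]
    show ((relationships.map (fun p => (p.1, PySem.Dict.mk p.2))).map Prod.fst).Nodup
    rw [List.map_map]
    exact hpre.1
  have hinner : ∀ kv ∈ rel.items, kv.2.keys.Nodup := by
    intro kv hm
    rw [hrel] at hm
    rcases List.mem_map.mp hm with ⟨pr, hpr, rfl⟩
    show (PySem.Dict.mk pr.2).keys.Nodup
    simpa using hpre.2.1 pr hpr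
  have hinv : pvInv rel := ⟨hnd, hinner⟩
  refine congrArg (fun d : PySem.Dict String (PySem.Dict String (List String)) =>
    d.items.map (fun p => (p.1, p.2.items))) ?_
  rw [pv_phase1_eq rel]
  have htempinv : pvInv ((rel.items.flatMap (fun pr =>
      (pr.2.getD "PARENT_OF" []).flatMap (fun child =>
        ((rel.getD child PySem.Dict.empty).getD "PARENT_OF" []).map (fun gc => (pr.1, gc))))).foldl
      pvApply PySem.Dict.empty) :=
    pv_inv_foldl_apply _ _ pv_inv_empty
  rw [pv_merge_lit _ _ hnd htempinv.2]
  have hA : pvMerge rel ((rel.items.flatMap (fun pr =>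
      (pr.2.getD "PARENT_OF" []).flatMap (fun child =>
        ((rel.getD child PySem.Dict.empty).getD "PARENT_OF" []).map (fun gc => (pr.1, gc))))).foldl
      pvApply PySem.Dict.empty)
      = (rel.items.flatMap (fun pr =>
          (pr.2.getD "PARENT_OF" []).flatMap (fun child =>
            ((rel.getD child PySem.Dict.empty).getD "PARENT_OF" []).map (fun gc => (pr.1, gc))))).foldl
          pvApply rel := by
    rw [pv_merge_foldl _ _ _ pv_inv_empty]; rfl
  have hcont : ∀ p ∈ rel.items.map Prod.fst, rel.contains p = true := by
    intro p hm
    have : p ∈ rel.keys := hm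
    rwa [PySem.Dict.contains_iff_mem_keys]
  have hB := pv_bpass rel (rel.items.map Prod.fst) rel hinv (fun _ => rfl) hcont
  have hE : ((rel.items.map Prod.fst).flatMap (fun p =>
      ((pvParentOf rel p).flatMap (fun child => pvParentOf rel child)).map
        (fun gc => (p, gc)))).foldl pvApply rel
      = (rel.items.flatMap (fun pr =>
          (pr.2.getD "PARENT_OF" []).flatMap (fun child =>
            ((rel.getD child PySem.Dict.empty).getD "PARENT_OF" []).map (fun gc => (pr.1, gc))))).foldl
          pvApply rel := by
    rw [List.flatMap_map]
    rw [List.foldl_flatMap, List.foldl_flatMap]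
    apply PySem.List.foldl_congr_mem
    intro acc pr hm
    have h1 : pvParentOf rel pr.1 = pr.2.getD "PARENT_OF" [] := by
      unfold pvParentOf
      rw [PySem.Dict.getD_of_mem_items rel (show (pr.1, pr.2) ∈ rel.items by simpa using hm) hnd]
    rw [List.map_flatMap, h1]
    simp only [pvParentOf]
  exact hA.trans (hE.symm.trans hB.symm)
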